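-- pv_equiv track=rewrite | github.com/WSobo/genesis_bio_mcp | src/genesis_bio_mcp/clients/iedb_tools.py | _estimate_peptide_count
-- ===== SOURCE A (Python) =====
-- def _estimate_peptide_count(fasta: str, length_range: list[int]) -> int:
--     """Estimate the number of windowed peptides the IEDB service will produce."""
--     count = 0
--     min_len = length_range[0]
--     max_len = length_range[1]
--     for line in fasta.splitlines():
--         if line.startswith(">"):
--             continue
--         L = len(line.strip())
--         if L == 0:
--             continue
--         if L < min_len:
--             continue
--         # Rough count: for each length l in [min_len, max_len], (L - l + 1) windows.
--         for length in range(min_len, max_len + 1):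
--             n = L - length + 1
--             if n > 0:
--                 count += n
--     return max(count, 1)
-- ===== SOURCE B (Python) =====
-- def _tri(m):
--     # m-th triangular number
--     return m * (m + 1) // 2
--
-- def _estimate_peptide_count(fasta: str, length_range: list[int]) -> int:
--     """Estimate the number of windowed peptides the IEDB service will produce."""
--     min_len = length_range[0]
--     max_len = length_range[1]
--     total = 0
--     for line in fasta.splitlines():
--         if line.startswith(">"):
--             continue
--         L = len(line.strip())
--         if L == 0 or L < min_len:
--             continue
--         hi = min(max_len, L)
--         if hi >= min_len:
--             # sum of (L - l + 1) for l in [min_len, hi], as a difference of triangular numbers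
--             total += _tri(L - min_len + 1) - _tri(L - hi)
--     return max(total, 1)
-- ===== Notes on version B (the rewrite author's own statement) =====
-- stated objective: alternative
-- what changed: The inner loop over every peptide length in [min_len, max_len] is replaced by a closed-form arithmetic-series count per line (difference of triangular numbers up to min(max_len, L)); a timing run measured no speedup on the generated inputs, whose length ranges are small.
import Mathlib
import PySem

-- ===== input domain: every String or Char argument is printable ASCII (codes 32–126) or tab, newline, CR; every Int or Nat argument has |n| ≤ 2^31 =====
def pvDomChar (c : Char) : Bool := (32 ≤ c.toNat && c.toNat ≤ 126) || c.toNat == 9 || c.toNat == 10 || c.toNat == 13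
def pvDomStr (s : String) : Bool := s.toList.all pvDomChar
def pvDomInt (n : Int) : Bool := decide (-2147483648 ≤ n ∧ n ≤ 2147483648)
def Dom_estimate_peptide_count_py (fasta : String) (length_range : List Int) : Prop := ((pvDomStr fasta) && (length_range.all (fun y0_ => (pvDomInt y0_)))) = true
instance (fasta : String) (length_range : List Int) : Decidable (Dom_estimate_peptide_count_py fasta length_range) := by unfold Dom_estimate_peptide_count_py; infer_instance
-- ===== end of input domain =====

-- B replaces the inner per-length loop by a closed-form arithmetic-series count per line (difference of triangular numbers).

-- ===== PORT A =====
def estimate_peptide_count_py (fasta : String) (length_range : List Int) : Int :=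
  match PySem.List.pyGet? length_range 0, PySem.List.pyGet? length_range 1 with
  | some min_len, some max_len =>
      let count := (PySem.Str.splitlines fasta).foldl (fun count line =>
        if PySem.Str.startswith line ">" then count
        else
          let L : Int := PySem.Str.len (PySem.Str.strip line)
          if L = 0 then count
          else if L < min_len then count
          else (PySem.List.pyRange min_len (max_len + 1) 1).foldl (fun count length =>
            let n := L - length + 1
            if n > 0 then count + n else count) count) 0
      max count 1
  | _, _ => 0  -- IndexError in Python: excluded by Pre_

-- ===== PORT B =====
def pvTri (m : Int) : Int := PySem.Int.floordiv (m * (m + 1)) 2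

def estimate_peptide_count_py_alt (fasta : String) (length_range : List Int) : Int :=
  match PySem.List.pyGet? length_range 0 with
  | none => 0  -- IndexError in Python: excluded by Pre_
  | some min_len =>
    match PySem.List.pyGet? length_range 1 with
    | none => 0  -- IndexError in Python: excluded by Pre_
    | some max_len =>
      let total := (PySem.Str.splitlines fasta).foldl (fun total line =>
        if PySem.Str.startswith line ">" then total
        else
          let L : Int := PySem.Str.len (PySem.Str.strip line)
          if L = 0 ∨ L < min_len then total
          else
            let hi := min max_len L
            if min_len ≤ hi then total + (pvTri (L - min_len + 1) - pvTri (L - hi))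
            else total) 0
      max total 1

-- ===== PRECONDITION & SPEC =====
-- Python A raises IndexError when length_range has fewer than 2 elements (so does B).
def Pre_estimate_peptide_count_py (fasta : String) (length_range : List Int) : Prop :=
  2 ≤ length_range.length
instance (fasta : String) (length_range : List Int) : Decidable (Pre_estimate_peptide_count_py fasta length_range) := by unfold Pre_estimate_peptide_count_py; infer_instance
def pvWitness_estimate_peptide_count_py : String × List Int := (">h\nACDEF\nGK", [2, 4])

def Spec_estimate_peptide_count_py (fasta : String) (length_range : List Int) (out : Int) : Prop := out = estimate_peptide_count_py_alt fasta length_range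
instance (fasta : String) (length_range : List Int) (out : Int) : Decidable (Spec_estimate_peptide_count_py fasta length_range out) := by unfold Spec_estimate_peptide_count_py; infer_instance

-- ===== CLAIM (what is proved, stated in full; the proofs are below) =====
def Claim_equal_estimate_peptide_count_py : Prop := ∀ (fasta : String) (length_range : List Int), Dom_estimate_peptide_count_py fasta length_range → Pre_estimate_peptide_count_py fasta length_range → Spec_estimate_peptide_count_py fasta length_range (estimate_peptide_count_py fasta length_range)

-- ===== LEMMAS AND PROOFS =====

lemma pvTri_succ (m : Int) : pvTri (m + 1) = (m + 1) + pvTri m := by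
  unfold pvTri
  rw [PySem.Int.floordiv_eq_ediv_of_pos (show (0:Int) < 2 by norm_num),
      PySem.Int.floordiv_eq_ediv_of_pos (show (0:Int) < 2 by norm_num)]
  have h : (m + 1) * (m + 1 + 1) = m * (m + 1) + (m + 1) * 2 := by ring
  rw [h, Int.add_mul_ediv_right _ _ (by norm_num)]
  ring

lemma pvRangeSum (L : Int) : ∀ (n : Nat) (a c : Int),
    (PySem.List.pyRange a (a + (n : Int)) 1).foldl (fun count length =>
        let nn := L - length + 1
        if nn > 0 then count + nn else count) c
      = if a ≤ min (a + (n : Int) - 1) L then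
          c + (pvTri (L - a + 1) - pvTri (L - min (a + (n : Int) - 1) L))
        else c := by
  intro n
  induction n with
  | zero =>
      intro a c
      rw [PySem.List.pyRange_one_eq_nil (by push_cast; omega)]
      have hc : ¬ a ≤ min (a + ((0 : Nat) : Int) - 1) L := by push_cast; omega
      simp [hc]
  | succ n ih =>
      intro a c
      rw [PySem.List.pyRange_one_cons (by push_cast; omega)]
      have hb : a + ((n + 1 : Nat) : Int) = (a + 1) + (n : Int) := by push_cast; ring
      rw [List.foldl_cons, hb, ih (a + 1)]
      set M := min ((a + 1) + (n : Int) - 1) L with hMdef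
      have hMle1 : M ≤ (a + 1) + (n : Int) - 1 := min_le_left _ _
      have hMle2 : M ≤ L := min_le_right _ _
      simp only []
      by_cases h1 : L - a + 1 > 0
      · have haL : a ≤ L := by omega
        have haM : a ≤ M := by omega
        by_cases h2 : a + 1 ≤ M
        · have hgoal : pvTri (L - a + 1) = (L - a + 1) + pvTri (L - a) := by
            have := pvTri_succ (L - a)
            simpa [sub_add_eq_add_sub] using this
          simp only [h1, if_true, h2, if_true, haM, if_true]
          rw [hgoal]; ring
        · have hMa : M = a := by omega
          have hgoal : pvTri (L - a + 1) = (L - a + 1) + pvTri (L - a) := by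
            have := pvTri_succ (L - a)
            simpa [sub_add_eq_add_sub] using this
          simp only [h1, if_true, h2, if_false, hMa]
          rw [hgoal]
          split_ifs <;> omega
      · have hLa : L < a := by omega
        have hna : ¬ a ≤ M := by omega
        have hna1 : ¬ a + 1 ≤ M := by omega
        simp [h1, hna, hna1]

lemma pvLineStep (mn mx L c : Int) :
    (PySem.List.pyRange mn (mx + 1) 1).foldl (fun count length =>
        let nn := L - length + 1
        if nn > 0 then count + nn else count) c
      = if mn ≤ min mx L then c + (pvTri (L - mn + 1) - pvTri (L - min mx L)) else c := by
  by_cases h : mn ≤ mx + 1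
  · have hn : mx + 1 = mn + ((mx + 1 - mn).toNat : Int) := by omega
    rw [hn, pvRangeSum]
    have : mn + ((mx + 1 - mn).toNat : Int) - 1 = mx := by omega
    rw [this]
  · rw [PySem.List.pyRange_one_eq_nil (by omega)]
    have hc : ¬ mn ≤ min mx L := by
      have := min_le_left mx L; omega
    simp [hc]

-- ===== VERDICT (by name: the statement is the Claim_ definition above) =====
set_option maxHeartbeats 2000000 in
theorem estimate_peptide_count_py_spec : Claim_equal_estimate_peptide_count_py := by
  intro fasta length_range _hDom hPre
  unfold Spec_estimate_peptide_count_py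
  match length_range, hPre with
  | a :: b :: rest, _ =>
    unfold estimate_peptide_count_py estimate_peptide_count_py_alt
    have h0 : PySem.List.pyGet? (a :: b :: rest) 0 = some a := by
      simp [PySem.List.pyGet?_zero]
    have h1 : PySem.List.pyGet? (a :: b :: rest) 1 = some b := by
      have := PySem.List.pyGet?_cons_succ (x := a) (xs := b :: rest) (n := 0)
      simp at this
      simpa [PySem.List.pyGet?_zero] using this
    rw [h0, h1]
    have key : ∀ (lines : List String) (c : Int),
        lines.foldl (fun count line =>
          if PySem.Str.startswith line ">" then count
          else
            let L : Int := PySem.Str.len (PySem.Str.strip line)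
            if L = 0 then count
            else if L < a then count
            else (PySem.List.pyRange a (b + 1) 1).foldl (fun count length =>
              let n := L - length + 1
              if n > 0 then count + n else count) count) c
        = lines.foldl (fun total line =>
          if PySem.Str.startswith line ">" then total
          else
            let L : Int := PySem.Str.len (PySem.Str.strip line)
            if L = 0 ∨ L < a then total
            else
              let hi := min b L
              if a ≤ hi then total + (pvTri (L - a + 1) - pvTri (L - hi))
              else total) c := by
      intro lines
      induction lines with
      | nil => intro c; rfl
      | cons line ls ih =>
          intro c
          rw [List.foldl_cons, List.foldl_cons, ih]
          congr 1
          simp only []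
          by_cases hst : PySem.Str.startswith line ">"
          · rw [if_pos hst, if_pos hst]
          · rw [if_neg hst, if_neg hst]
            by_cases hz : PySem.Str.len (PySem.Str.strip line) = 0
            · rw [if_pos hz, if_pos (Or.inl hz)]
            · by_cases hlt : PySem.Str.len (PySem.Str.strip line) < a
              · rw [if_neg hz, if_pos hlt, if_pos (Or.inr hlt)]
              · rw [if_neg hz, if_neg hlt,
                    if_neg (show ¬ (PySem.Str.len (PySem.Str.strip line) = 0 ∨
                      PySem.Str.len (PySem.Str.strip line) < a) by tauto)]
                rw [pvLineStep a b (PySem.Str.len (PySem.Str.strip line)) c]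
    simp only []
    rw [key (PySem.Str.splitlines fasta) 0]
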